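-- pv_equiv track=rewrite | github.com/aliuyar1234/DealGuard | backend/src/dealguard/domain/legal/knowledge_retriever.py | _find_term_positions
-- ===== SOURCE A (Python) =====
-- def _find_term_positions(
--
--     text: str,
--     terms: list[str],
-- ) -> list[int]:
--     """Find positions of query terms in text."""
--     positions = []
--     for term in terms:
--         pos = text.find(term)
--         if pos != -1:
--             positions.append(pos)
--     return sorted(positions)
-- ===== SOURCE B (Python) =====
-- def _find_term_positions(
--     text: str,
--     terms: list[str],
-- ) -> list[int]:
--     """Find positions of query terms in text (single left-to-right scan,
--     hash-set lookup of one substring per distinct pending term length)."""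
--     n = len(text)
--     pending = set(terms)
--     lengths = sorted(set(len(t) for t in pending))
--     first = {}
--     i = 0
--     while pending and i <= n:
--         for L in lengths:
--             if i + L > n:
--                 break
--             sub = text[i:i + L]
--             if sub in pending:
--                 first[sub] = i
--                 pending.discard(sub)
--         i += 1
--     return sorted(first[t] for t in terms if t in first)
-- ===== Notes on version B (the rewrite author's own statement) =====
-- stated objective: faster
-- what changed: Instead of one text.find per term followed by a sort, B makes a single left-to-right scan over text positions, testing one substring per distinct pending term length against a hash set of unfound terms (with early exit once all terms are found), then maps the terms through the first-occurrence dict and sorts.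
import Mathlib
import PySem

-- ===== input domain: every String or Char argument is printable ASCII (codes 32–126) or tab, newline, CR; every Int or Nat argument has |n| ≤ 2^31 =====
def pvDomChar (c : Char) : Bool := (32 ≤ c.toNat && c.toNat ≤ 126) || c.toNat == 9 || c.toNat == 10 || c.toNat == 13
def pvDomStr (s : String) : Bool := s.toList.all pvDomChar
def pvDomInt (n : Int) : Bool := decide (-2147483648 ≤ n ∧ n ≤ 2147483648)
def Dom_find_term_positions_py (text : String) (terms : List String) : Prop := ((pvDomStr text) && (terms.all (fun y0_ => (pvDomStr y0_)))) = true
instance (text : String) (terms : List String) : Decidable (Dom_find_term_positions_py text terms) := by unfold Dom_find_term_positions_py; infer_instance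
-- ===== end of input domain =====

-- B replaces the per-term text.find calls by one left-to-right scan over text positions,
-- hash-set testing one substring per distinct pending term length (objective: faster).

-- ===== PORT A =====
def find_term_positions_py (text : String) (terms : List String) : List Int :=
  let positions := terms.foldl (fun acc term =>
    let pos := PySem.Str.find text term
    if pos ≠ -1 then acc ++ [pos] else acc) []
  PySem.List.sorted positions (fun x => x) false

-- ===== PORT B =====
-- the 'for L in lengths: if i + L > n: break; sub = text[i:i+L]; if sub in pending: …' body of Source B
def bInner (text : String) (i : Nat) (lengths : List Nat)
    (pending : PySem.Set String) (first : PySem.Dict String Int) :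
    PySem.Set String × PySem.Dict String Int :=
  match lengths with
  | [] => (pending, first)
  | L :: rest =>
    if text.toList.length < i + L then (pending, first)  -- break
    else
      let sub := PySem.Str.slice text (some (i : Int)) (some ((i : Int) + (L : Int)))
      if PySem.Set.contains pending sub then
        bInner text i rest (PySem.Set.discard pending sub) (first.insert sub (i : Int))
      else bInner text i rest pending first

-- the 'while pending and i <= n' loop of Source B; fuel = n + 1 - i keeps it structural
def bScan (text : String) (i : Nat) (fuel : Nat) (lengths : List Nat)
    (pending : PySem.Set String) (first : PySem.Dict String Int) : PySem.Dict String Int :=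
  match fuel with
  | 0 => first
  | fuel + 1 =>
    if pending = [] then first
    else
      let s := bInner text i lengths pending first
      bScan text (i + 1) fuel lengths s.1 s.2

def find_term_positions_py_alt (text : String) (terms : List String) : List Int :=
  let n := text.toList.length
  let pending := PySem.Set.ofList terms
  -- sorted(set(len(t) for t in pending))
  let lengths := PySem.List.sorted
    (PySem.Set.ofList (pending.map (fun t => t.toList.length))) (fun x => x) false
  let first := bScan text 0 (n + 1) lengths pending PySem.Dict.empty
  PySem.List.sorted (terms.filterMap (fun t => first.get? t)) (fun x => x) false

-- ===== PRECONDITION & SPEC =====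
def Spec_find_term_positions_py (text : String) (terms : List String) (out : List Int) : Prop := out = find_term_positions_py_alt text terms
instance (text : String) (terms : List String) (out : List Int) : Decidable (Spec_find_term_positions_py text terms out) := by unfold Spec_find_term_positions_py; infer_instance

-- ===== CLAIM (what is proved, stated in full; the proofs are below) =====
def Claim_equal_find_term_positions_py : Prop := ∀ (text : String) (terms : List String), Dom_find_term_positions_py text terms → Spec_find_term_positions_py text terms (find_term_positions_py text terms)

-- ===== LEMMAS AND PROOFS =====

-- with no match before position i, a match at i means find = i
theorem prefix_eq_find (tl : List Char) (i : Nat) (t : String)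
    (hno : ∀ j < i, ¬ (t.toList <+: tl.drop j)) :
    (t.toList <+: tl.drop i) ↔ PySem.Chars.find tl t.toList = (i : Int) := by
  constructor
  · intro hpre
    have hne : PySem.Chars.find tl t.toList ≠ -1 := by
      rw [PySem.Chars.find_ne_neg_one_iff]
      exact (PySem.Chars.isIn_iff_infix _ _).1
        ((PySem.Chars.exists_prefix_drop_iff_isIn _ _).1 ⟨i, hpre⟩)
    have hnn : 0 ≤ PySem.Chars.find tl t.toList := by
      have := PySem.Chars.neg_one_le_find tl t.toList; omega
    obtain ⟨hat, hmin⟩ := PySem.Chars.find_spec (s := tl) (sub := t.toList) hnn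
    have hle : (PySem.Chars.find tl t.toList).toNat ≤ i := by
      by_contra hgt
      exact hmin i (by omega) hpre
    have hge : i ≤ (PySem.Chars.find tl t.toList).toNat := by
      by_contra hlt
      exact hno _ (by omega) hat
    omega
  · intro hf
    have hnn : (0:Int) ≤ (i:Int) := by positivity
    obtain ⟨hat, _⟩ := PySem.Chars.find_spec (s := tl) (sub := t.toList) (hf ▸ hnn)
    have : (PySem.Chars.find tl t.toList).toNat = i := by omega
    exact this ▸ hat

-- the inner loop over pending lengths finds exactly the pending terms that match at position i
theorem bInner_spec (text : String) (i : Nat) (lengths : List Nat) :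
    ∀ (pending : PySem.Set String) (first : PySem.Dict String Int),
    i ≤ text.toList.length →
    lengths.Pairwise (· < ·) →
    (∀ t ∈ pending, t.toList <+: text.toList.drop i → t.toList.length ∈ lengths) →
    (∀ t : String,
      (t ∈ (bInner text i lengths pending first).1 ↔
        t ∈ pending ∧ ¬ (t.toList <+: text.toList.drop i))) ∧
    (∀ t : String,
      (bInner text i lengths pending first).2.get? t =
        if t ∈ pending ∧ t.toList <+: text.toList.drop i then some (i : Int)
        else first.get? t) := by
  induction lengths with
  | nil =>
    intro pending first _ _ hcov
    refine ⟨fun t => ?_, fun t => ?_⟩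
    · simp only [bInner]
      constructor
      · intro ht; exact ⟨ht, fun hpre => by simpa using hcov t ht hpre⟩
      · exact fun h => h.1
    · simp only [bInner]
      rw [if_neg]
      rintro ⟨hmem, hpre⟩
      simpa using hcov t hmem hpre
  | cons L rest ih =>
    intro pending first hin hsort hcov
    have hsort' := (List.pairwise_cons.1 hsort).2
    have hLlt := (List.pairwise_cons.1 hsort).1
    by_cases hbrk : text.toList.length < i + L
    · -- break: every pending length is ≥ L, so nothing can match at i
      have hnopre : ∀ t ∈ pending, ¬ (t.toList <+: text.toList.drop i) := by
        intro t hmem hpre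
        have hlenmem := hcov t hmem hpre
        have hge : L ≤ t.toList.length := by
          rcases List.mem_cons.1 hlenmem with h | h
          · omega
          · exact le_of_lt (hLlt _ h)
        have := hpre.length_le
        simp only [List.length_drop] at this
        omega
      refine ⟨fun t => ?_, fun t => ?_⟩
      · simp only [bInner, if_pos hbrk]
        exact ⟨fun ht => ⟨ht, hnopre t ht⟩, fun h => h.1⟩
      · simp only [bInner, if_pos hbrk]
        rw [if_neg]
        rintro ⟨hmem, hpre⟩
        exact hnopre t hmem hpre
    · -- no break: i + L ≤ n; the unique candidate of length L is text[i:i+L]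
      have hsubl : (PySem.Str.slice text (some (i : Int))
          (some ((i : Int) + (L : Int)))).toList = (text.toList.drop i).take L := by
        simp [PySem.List.slice_natCast_add]
      set sub := PySem.Str.slice text (some (i : Int))
          (some ((i : Int) + (L : Int))) with hsubdef
      have hsubpre : sub.toList <+: text.toList.drop i := by
        rw [hsubl]; exact List.take_prefix _ _
      -- a pending term of length L matches at i iff it IS sub
      have huniq : ∀ t : String, t.toList.length = L →
          ((t.toList <+: text.toList.drop i) ↔ t = sub) := by
        intro t hlen
        constructor
        · intro hpre
          have h1 : t.toList = (text.toList.drop i).take L := by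
            have := List.prefix_iff_eq_take.1 hpre
            rwa [hlen] at this
          exact String.toList_inj.1 (by rw [h1, hsubl])
        · intro h; rw [h]; exact hsubpre
      by_cases hc : sub ∈ pending
      · have hcb : PySem.Set.contains pending sub = true := by
          simpa [PySem.Set.contains] using hc
        have hres : bInner text i (L :: rest) pending first =
            bInner text i rest (PySem.Set.discard pending sub)
              (first.insert sub (i : Int)) := by
          simp only [bInner, if_neg hbrk, hcb, if_true, ← hsubdef]
        obtain ⟨iha, ihb⟩ := ih (PySem.Set.discard pending sub) (first.insert sub (i : Int))
          hin hsort' (by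
            intro t hmem hpre
            obtain ⟨hmem', hne⟩ := (PySem.Set.mem_discard _ _ _).1 hmem
            rcases List.mem_cons.1 (hcov t hmem' hpre) with h | h
            · exact absurd ((huniq t h).1 hpre) hne
            · exact h)
        refine ⟨fun t => ?_, fun t => ?_⟩
        · rw [hres, iha t, PySem.Set.mem_discard]
          constructor
          · rintro ⟨⟨hm, _⟩, hnp⟩; exact ⟨hm, hnp⟩
          · rintro ⟨hm, hnp⟩
            exact ⟨⟨hm, fun he => hnp (he ▸ hsubpre)⟩, hnp⟩
        · rw [hres, ihb t]
          by_cases he : t = sub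
          · rw [he]
            rw [if_neg (fun h => ((PySem.Set.mem_discard _ _ _).1 h.1).2 rfl),
              if_pos ⟨hc, hsubpre⟩, PySem.Dict.get?_insert_self]
          · rw [PySem.Dict.get?_insert, if_neg he]
            by_cases hp : t ∈ pending ∧ t.toList <+: text.toList.drop i
            · rw [if_pos hp, if_pos ⟨(PySem.Set.mem_discard _ _ _).2 ⟨hp.1, he⟩, hp.2⟩]
            · rw [if_neg hp, if_neg]
              rintro ⟨hm, hpre⟩
              exact hp ⟨((PySem.Set.mem_discard _ _ _).1 hm).1, hpre⟩
      · have hcb : PySem.Set.contains pending sub = false := by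
          simpa [PySem.Set.contains] using hc
        have hres : bInner text i (L :: rest) pending first =
            bInner text i rest pending first := by
          simp only [bInner, if_neg hbrk, ← hsubdef, hcb, Bool.false_eq_true, if_false]
        obtain ⟨iha, ihb⟩ := ih pending first hin hsort' (by
          intro t hmem hpre
          rcases List.mem_cons.1 (hcov t hmem hpre) with h | h
          · exact absurd ((huniq t h).1 hpre ▸ hmem) hc
          · exact h)
        exact ⟨fun t => hres ▸ iha t, fun t => hres ▸ ihb t⟩

-- the scan loop computes every term's first occurrence (= Python's find) for terms still pending
theorem bScan_get? (text : String) (lengths : List Nat)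
    (hsort : lengths.Pairwise (· < ·)) (fuel : Nat) :
    ∀ (i : Nat) (pending : PySem.Set String) (first : PySem.Dict String Int) (t : String),
    i + fuel = text.toList.length + 1 →
    (∀ s ∈ pending, ∀ j < i, ¬ (s.toList <+: text.toList.drop j)) →
    (∀ s ∈ pending, s.toList.length ∈ lengths) →
    (bScan text i fuel lengths pending first).get? t =
      if t ∈ pending ∧ PySem.Chars.find text.toList t.toList ≠ -1
      then some (PySem.Chars.find text.toList t.toList) else first.get? t := by
  induction fuel with
  | zero =>
    intro i pending first t hif hno _
    simp only [bScan]
    rw [if_neg]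
    rintro ⟨hmem, hne⟩
    have hnn : 0 ≤ PySem.Chars.find text.toList t.toList := by
      have := PySem.Chars.neg_one_le_find text.toList t.toList; omega
    have hle := PySem.Chars.find_le_length text.toList t.toList
    obtain ⟨hat, _⟩ := PySem.Chars.find_spec (s := text.toList) (sub := t.toList) hnn
    have hlt : (PySem.Chars.find text.toList t.toList).toNat < i := by omega
    exact hno t hmem _ hlt hat
  | succ fuel ih =>
    intro i pending first t hif hno hcov
    simp only [bScan]
    by_cases hp : pending = []
    · simp [hp]
    · rw [if_neg hp]
      obtain ⟨ha, hb⟩ := bInner_spec text i lengths pending first (by omega) hsort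
        (fun s hs _ => hcov s hs)
      rw [ih (i + 1) _ _ t (by omega)
        (by
          intro s hs j hj
          obtain ⟨hsp, hnp⟩ := (ha s).1 hs
          rcases Nat.lt_succ_iff_lt_or_eq.1 hj with hj' | hj'
          · exact hno s hsp j hj'
          · exact hj' ▸ hnp)
        (fun s hs => hcov s ((ha s).1 hs).1)]
      rw [hb t]
      by_cases hmem : t ∈ pending
      · have hiff := prefix_eq_find text.toList i t (fun j hj => hno t hmem j hj)
        by_cases hne : PySem.Chars.find text.toList t.toList = -1
        · have hnp : ¬ (t.toList <+: text.toList.drop i) := fun h => by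
            have := hiff.1 h; omega
          rw [if_neg (by rintro ⟨_, h⟩; exact h hne), if_neg (fun h => hnp h.2),
            if_neg (by rintro ⟨_, h⟩; exact h hne)]
        · by_cases hi : PySem.Chars.find text.toList t.toList = (i : Int)
          · have hpre := hiff.2 hi
            have hnins : t ∉ (bInner text i lengths pending first).1 := by
              rw [ha t]; rintro ⟨_, h⟩; exact h hpre
            rw [if_neg (fun h => hnins h.1), if_pos ⟨hmem, hpre⟩,
              if_pos ⟨hmem, hne⟩, hi]
          · have hnp : ¬ (t.toList <+: text.toList.drop i) := fun h => hi (hiff.1 h)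
            rw [if_pos ⟨(ha t).2 ⟨hmem, hnp⟩, hne⟩, if_pos ⟨hmem, hne⟩]
      · have hnins : t ∉ (bInner text i lengths pending first).1 := by
          rw [ha t]; rintro ⟨h, _⟩; exact hmem h
        rw [if_neg (fun h => hnins h.1), if_neg (fun h => hmem h.1),
          if_neg (fun h => hmem h.1)]

theorem filterMap_if_eq_map_filter (terms : List String) (F : String → Int) :
    terms.filterMap (fun t => if F t = -1 then none else some (F t)) =
      (terms.filter (fun t => !decide (F t = -1))).map F := by
  induction terms with
  | nil => rfl
  | cons h tl ih => by_cases hc : F h = -1 <;> simp [hc, ih]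

-- ===== VERDICT (by name: the statement is the Claim_ definition above) =====
theorem find_term_positions_py_spec : Claim_equal_find_term_positions_py := by
  intro text terms _
  unfold Spec_find_term_positions_py find_term_positions_py find_term_positions_py_alt
  simp only
  congr 1
  rw [PySem.List.foldl_append_ite (p := fun term => PySem.Str.find text term ≠ -1)
      (f := fun term => PySem.Str.find text term)]
  have hget : ∀ t : String,
      (bScan text 0 (text.toList.length + 1)
        (PySem.List.sorted (PySem.Set.ofList
          ((PySem.Set.ofList terms).map (fun t => t.toList.length))) (fun x => x) false)
        (PySem.Set.ofList terms) PySem.Dict.empty).get? t =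
      if t ∈ terms ∧ PySem.Chars.find text.toList t.toList ≠ -1
      then some (PySem.Chars.find text.toList t.toList) else none := by
    intro t
    rw [bScan_get? text _ (PySem.List.sorted_ofList_pairwise_lt _)
      (text.toList.length + 1) 0 _ _ t (by omega)
      (fun s _ j hj => absurd hj (by omega))
      (by
        intro s hs
        rw [PySem.List.mem_sorted, PySem.Set.mem_ofList]
        exact List.mem_map.2 ⟨s, hs, rfl⟩)]
    simp only [PySem.Set.mem_ofList, PySem.Dict.get?_empty]
  have hB : terms.filterMap
      (fun t => (bScan text 0 (text.toList.length + 1)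
        (PySem.List.sorted (PySem.Set.ofList
          ((PySem.Set.ofList terms).map (fun t => t.toList.length))) (fun x => x) false)
        (PySem.Set.ofList terms) PySem.Dict.empty).get? t) =
      terms.filterMap (fun t => if PySem.Chars.find text.toList t.toList = -1 then none
        else some (PySem.Chars.find text.toList t.toList)) := by
    apply List.filterMap_congr
    intro t ht
    rw [hget t]
    by_cases hne : PySem.Chars.find text.toList t.toList = -1 <;> simp [ht, hne]
  rw [hB, filterMap_if_eq_map_filter]
  simp [PySem.Str.find_eq, decide_not]
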